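-- pv_equiv track=rewrite | github.com/simonp993/k-matrix-toolkit-v2 | src/K_Matrix_Tool_Functions.py | get_number_of_KMatrix
-- ===== SOURCE A (Python) =====
-- def get_number_of_KMatrix(list_file_path_split: list, selected_kmatrix: str):
--     """
--     Get ID of chosen KMatrix
--     Needed cause of same ID for different signals
--     :param list_file_path_split: List of Lists containing all Elements of the directory leading to the File
--     :param selected_kmatrix: String conataining name of selected KMatrix
--     :return id_kmatrix: Number of Kmatrix in List of paths
--     :return list_file_path_split: List of Lists containing all Elements of the directory leading to the File
--     """
--     id_kmatrix = 0
--     for idx, file_path in enumerate(list_file_path_split):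
--         for item in file_path:
--             if selected_kmatrix in item:
--                 id_kmatrix = idx
--                 break
--     return id_kmatrix, list_file_path_split
-- ===== SOURCE B (Python) =====
-- def get_number_of_KMatrix(list_file_path_split: list, selected_kmatrix: str):
--     # Scan backwards and stop at the first matching path: the last match in
--     # forward order.  A instead scans the whole list forward, overwriting.
--     for idx, file_path in reversed(list(enumerate(list_file_path_split))):
--         if any(selected_kmatrix in item for item in file_path):
--             return idx, list_file_path_split
--     return 0, list_file_path_split
-- ===== Notes on version B (the rewrite author's own statement) =====
-- stated objective: alternative
-- what changed: B traverses the list in reverse and returns at the first matching index (early exit), instead of A's full forward scan that overwrites an accumulator; the last-match-wins result is the same.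
import Mathlib
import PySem

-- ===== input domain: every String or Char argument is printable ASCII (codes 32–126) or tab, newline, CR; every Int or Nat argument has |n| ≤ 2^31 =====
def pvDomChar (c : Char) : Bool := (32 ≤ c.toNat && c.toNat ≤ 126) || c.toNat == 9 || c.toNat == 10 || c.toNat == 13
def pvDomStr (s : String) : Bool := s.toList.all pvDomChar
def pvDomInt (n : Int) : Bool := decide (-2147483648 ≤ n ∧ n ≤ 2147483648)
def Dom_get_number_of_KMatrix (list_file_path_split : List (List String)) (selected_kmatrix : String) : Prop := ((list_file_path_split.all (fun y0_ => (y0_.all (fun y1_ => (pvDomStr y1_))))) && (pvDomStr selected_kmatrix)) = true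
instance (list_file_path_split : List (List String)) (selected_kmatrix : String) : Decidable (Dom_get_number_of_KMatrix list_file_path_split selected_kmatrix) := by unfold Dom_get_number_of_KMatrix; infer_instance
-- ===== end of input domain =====

-- B scans the list in reverse and returns at the first match (early exit), instead of A's full forward scan with an overwriting accumulator; same last-match-wins result.


-- ===== PORT A =====
-- inner 'for item in file_path: if selected_kmatrix in item: … break' — first match wins
def pvInnerHit (selected_kmatrix : String) (file_path : List String) : Bool :=
  match file_path with
  | [] => false
  | item :: rest =>
      if PySem.Str.isIn selected_kmatrix item then true else pvInnerHit selected_kmatrix rest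

def get_number_of_KMatrix (list_file_path_split : List (List String)) (selected_kmatrix : String) : Int × List (List String) :=
  let id_kmatrix : Int :=
    (PySem.List.enumerate list_file_path_split).foldl
      (fun id_kmatrix p => if pvInnerHit selected_kmatrix p.2 then p.1 else id_kmatrix) 0
  (id_kmatrix, list_file_path_split)

-- ===== PORT B =====
-- B: 'for idx, file_path in reversed(list(enumerate(...))): if any(...): return idx, ...' — early-exit backward scan
def pvBackScan (selected_kmatrix : String) : List (Int × List String) → Int
  | [] => 0
  | p :: rest =>
      if p.2.any (fun item => PySem.Str.isIn selected_kmatrix item) then p.1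
      else pvBackScan selected_kmatrix rest

def get_number_of_KMatrix_alt (list_file_path_split : List (List String)) (selected_kmatrix : String) : Int × List (List String) :=
  (pvBackScan selected_kmatrix (PySem.List.enumerate list_file_path_split).reverse, list_file_path_split)

-- ===== PRECONDITION & SPEC =====
def Spec_get_number_of_KMatrix (list_file_path_split : List (List String)) (selected_kmatrix : String) (out : Int × List (List String)) : Prop := out = get_number_of_KMatrix_alt list_file_path_split selected_kmatrix
instance (list_file_path_split : List (List String)) (selected_kmatrix : String) (out : Int × List (List String)) : Decidable (Spec_get_number_of_KMatrix list_file_path_split selected_kmatrix out) := by unfold Spec_get_number_of_KMatrix; infer_instance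

-- ===== CLAIM (what is proved, stated in full; the proofs are below) =====
def Claim_equal_get_number_of_KMatrix : Prop := ∀ (list_file_path_split : List (List String)) (selected_kmatrix : String), Dom_get_number_of_KMatrix list_file_path_split selected_kmatrix → Spec_get_number_of_KMatrix list_file_path_split selected_kmatrix (get_number_of_KMatrix list_file_path_split selected_kmatrix)

-- ===== LEMMAS AND PROOFS =====

theorem pvInnerHit_eq_any (s : String) (fp : List String) :
    pvInnerHit s fp = fp.any (fun item => PySem.Str.isIn s item) := by
  induction fp with
  | nil => rfl
  | cons a t ih => by_cases h : PySem.Str.isIn s a <;> simp [pvInnerHit, List.any_cons, ih]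

-- the early-exit backward scan is find?-then-default on the reversed list
theorem pvBackScan_eq_find (s : String) (rl : List (Int × List String)) :
    pvBackScan s rl
      = ((rl.find? (fun p => p.2.any (fun item => PySem.Str.isIn s item))).map Prod.fst).getD 0 := by
  induction rl with
  | nil => rfl
  | cons p t ih =>
      cases h : p.2.any (fun item => PySem.Str.isIn s item) <;>
        simp only [pvBackScan, List.find?_cons, h, ih, Bool.false_eq_true, if_false, if_true,
          Option.map_some, Option.getD_some]

-- A's last-wins forward fold equals find?-then-default on the reversed list
theorem foldl_eq_find (s : String) (l : List (Int × List String)) (acc : Int) :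
    l.foldl (fun id p => if pvInnerHit s p.2 then p.1 else id) acc
      = ((l.reverse.find? (fun p => p.2.any (fun item => PySem.Str.isIn s item))).map Prod.fst).getD acc := by
  induction l generalizing acc with
  | nil => rfl
  | cons p t ih =>
      rw [List.foldl_cons, ih, List.reverse_cons, List.find?_append]
      cases hf : t.reverse.find? (fun p => p.2.any (fun item => PySem.Str.isIn s item)) with
      | some q => simp
      | none =>
          rw [List.find?_cons]
          cases h : p.2.any (fun item => PySem.Str.isIn s item) <;>
            simp only [pvInnerHit_eq_any, h, Bool.false_eq_true, if_false, if_true] <;> rfl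

-- ===== VERDICT (by name: the statement is the Claim_ definition above) =====
theorem get_number_of_KMatrix_spec : Claim_equal_get_number_of_KMatrix := by
  intro l s _
  unfold Spec_get_number_of_KMatrix get_number_of_KMatrix get_number_of_KMatrix_alt
  rw [foldl_eq_find, pvBackScan_eq_find]
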